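-- pv_equiv track=rewrite | github.com/groselt/AoC | 2020/day09.py | part1
-- ===== SOURCE A (Python) =====
-- from collections import deque
-- from typing import Callable, Deque, List
--
-- def is_valid(preamble: Deque[int], total: int) -> bool:
--     preamble_set = set(preamble)
--     for first_number in preamble_set:
--         other_number = total - first_number
--         if other_number != first_number and other_number in preamble_set:
--             return True
--     return False
--
-- def part1(numbers: List[int]) -> int:
--     preamble = deque(numbers[:25])
--     for next_number in numbers[25:]:
--         if not is_valid(preamble, next_number):
--             return next_number
--         preamble.popleft()
--         preamble.append(next_number)
--     return 0
-- ===== SOURCE B (Python) =====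
-- def part1(numbers):
--     for idx, total in enumerate(numbers[25:]):
--         vals = list(set(numbers[idx:idx + 25]))
--         if not any(vals[j] + vals[k] == total
--                    for j in range(len(vals))
--                    for k in range(j + 1, len(vals))):
--             return total
--     return 0
-- ===== Notes on version B (the rewrite author's own statement) =====
-- stated objective: alternative
-- what changed: Replaces the complement-probe validity test over an evolving deque with explicit enumeration of all unordered pairs of the window's distinct values (index-recomputed windows, no mutable deque); pairwise enumeration trades the O(w) set probe for O(w^2) pair scanning per step.
import Mathlib
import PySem

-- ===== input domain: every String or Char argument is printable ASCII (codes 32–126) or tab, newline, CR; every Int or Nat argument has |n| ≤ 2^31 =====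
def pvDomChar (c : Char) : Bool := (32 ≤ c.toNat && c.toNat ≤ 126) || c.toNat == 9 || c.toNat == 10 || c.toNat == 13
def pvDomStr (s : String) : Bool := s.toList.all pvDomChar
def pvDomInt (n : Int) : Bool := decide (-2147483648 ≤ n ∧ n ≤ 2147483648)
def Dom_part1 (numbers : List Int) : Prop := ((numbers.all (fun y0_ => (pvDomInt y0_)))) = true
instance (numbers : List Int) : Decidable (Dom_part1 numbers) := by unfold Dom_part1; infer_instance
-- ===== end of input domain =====

-- B replaces A's complement-probe test over an evolving deque by enumerating all
-- unordered pairs of the window's distinct values on index-recomputed windows (alternative decomposition).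

-- ===== PORT A =====
-- is_valid: iterate over set(preamble); result is a boolean 'any', independent of hash order
def isValid (preamble : List Int) (total : Int) : Bool :=
  let s : PySem.Set Int := PySem.Set.ofList preamble
  s.any (fun first => decide (total - first ≠ first) && PySem.Set.contains s (total - first))

-- the for-loop of part1; preamble.tail models deque.popleft (the deque always has 25
-- elements when the loop body runs, so popleft never sees an empty deque)
def part1Loop (preamble : List Int) : List Int → Int
  | [] => 0
  | x :: xs => if !isValid preamble x then x else part1Loop (preamble.tail ++ [x]) xs

def part1 (numbers : List Int) : Int :=
  part1Loop (numbers.take 25) (numbers.drop 25)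

-- ===== PORT B =====
-- any(vals[j] + vals[k] == total for j in range(len(vals)) for k in range(j+1, len(vals)))
def hasPair (vals : List Int) (total : Int) : Bool :=
  (List.range vals.length).any (fun j =>
    (List.range' (j + 1) (vals.length - (j + 1))).any (fun k =>
      vals.getD j 0 + vals.getD k 0 == total))

-- the enumerate loop of B, idx being the enumerate counter; list(set(...)) is consumed
-- only through the order-independent boolean 'hasPair'
def altLoop (numbers : List Int) (idx : Nat) : List Int → Int
  | [] => 0
  | total :: rest =>
      let vals : List Int := PySem.Set.ofList ((numbers.drop idx).take 25)
      if !hasPair vals total then total else altLoop numbers (idx + 1) rest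

def part1_alt (numbers : List Int) : Int :=
  altLoop numbers 0 (numbers.drop 25)

-- ===== PRECONDITION & SPEC =====
def Spec_part1 (numbers : List Int) (out : Int) : Prop := out = part1_alt numbers
instance (numbers : List Int) (out : Int) : Decidable (Spec_part1 numbers out) := by unfold Spec_part1; infer_instance

-- ===== CLAIM (what is proved, stated in full; the proofs are below) =====
def Claim_equal_part1 : Prop := ∀ (numbers : List Int), Dom_part1 numbers → Spec_part1 numbers (part1 numbers)

-- ===== LEMMAS AND PROOFS =====

-- A's complement probe and B's pairwise scan agree on any duplicate-free value list
lemma isValid_eq_hasPair (w : List Int) (total : Int) :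
    isValid w total = hasPair (PySem.Set.ofList w) total := by
  have hnd : (PySem.Set.ofList w).Nodup := PySem.Set.nodup_ofList w
  set vals : List Int := PySem.Set.ofList w with hv
  rw [Bool.eq_iff_iff]
  unfold isValid hasPair
  simp only [← hv, List.any_eq_true, List.mem_range, List.mem_range'_1,
    Bool.and_eq_true, decide_eq_true_eq, PySem.Set.contains_iff, beq_iff_eq]
  constructor
  · rintro ⟨x, hx, hne, hy⟩
    obtain ⟨j, hj, hjx⟩ := List.getElem_of_mem hx
    obtain ⟨k, hk, hky⟩ := List.getElem_of_mem hy
    have hjk : j ≠ k := by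
      intro h; subst h; rw [hjx] at hky; omega
    rcases Nat.lt_or_ge j k with hlt | hge
    · exact ⟨j, hj, k, ⟨by omega, by omega⟩,
        by rw [List.getD_eq_getElem _ _ hj, List.getD_eq_getElem _ _ hk, hjx, hky]; ring⟩
    · have hlt : k < j := by omega
      exact ⟨k, hk, j, ⟨by omega, by omega⟩,
        by rw [List.getD_eq_getElem _ _ hk, List.getD_eq_getElem _ _ hj, hjx, hky]; ring⟩
  · rintro ⟨j, hj, k, ⟨hk1, hk2⟩, hsum⟩
    have hk : k < vals.length := by omega
    rw [List.getD_eq_getElem _ _ hj, List.getD_eq_getElem _ _ hk] at hsum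
    refine ⟨vals[j], List.getElem_mem hj, ?_, ?_⟩
    · intro h
      have : vals[j] = vals[k] := by omega
      have := (List.Nodup.getElem_inj_iff hnd).mp this
      omega
    · have : total - vals[j] = vals[k] := by omega
      rw [this]; exact List.getElem_mem hk

-- the loop invariant: A's evolving deque equals B's index-recomputed slice
lemma loop_eq (ns : List Int) : ∀ (rest : List Int) (idx : Nat),
    ns.drop (idx + 25) = rest →
    part1Loop ((ns.drop idx).take 25) rest = altLoop ns idx rest := by
  intro rest
  induction rest with
  | nil => intro idx _; rfl
  | cons total rest' ih =>
    intro idx h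
    have hlen : idx + 25 < ns.length := by
      by_contra hc
      have : ns.drop (idx + 25) = [] := List.drop_eq_nil_of_le (by omega)
      rw [h] at this; simp at this
    have hget : ns[idx + 25]? = some total := by
      have h0 : (ns.drop (idx + 25))[0]? = some total := by rw [h]; rfl
      simpa using h0
    unfold part1Loop altLoop
    rw [isValid_eq_hasPair]
    by_cases hp : hasPair (PySem.Set.ofList ((ns.drop idx).take 25)) total
    · simp only [hp, Bool.not_true]
      have hwin : ((ns.drop idx).take 25).tail ++ [total] = (ns.drop (idx + 1)).take 25 := by
        have h1 : ((ns.drop idx).take 25).tail = (ns.drop (idx + 1)).take 24 := by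
          rw [← List.drop_one, List.drop_take, List.drop_drop]
        have h2 : (ns.drop (idx + 1)).take 25 = (ns.drop (idx + 1)).take 24 ++
            ((ns.drop (idx + 1))[24]?).toList := List.take_add_one
        have h3 : (ns.drop (idx + 1))[24]? = some total := by
          simp only [List.getElem?_drop]
          rw [show idx + 1 + 24 = idx + 25 by omega, hget]
        rw [h1, h2, h3]; rfl
      rw [hwin]
      exact ih (idx + 1) (by rw [show idx + 1 + 25 = (idx + 25) + 1 by omega,
        ← List.drop_drop, h, List.drop_one]; rfl)
    · simp [hp]

-- ===== VERDICT (by name: the statement is the Claim_ definition above) =====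
theorem part1_spec : Claim_equal_part1 := by
  intro numbers _
  unfold Spec_part1 part1 part1_alt
  have := loop_eq numbers (numbers.drop 25) 0 (by norm_num)
  simpa using this
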